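-- pv_equiv track=rewrite | github.com/welikeheon/little-by-little | (100) Programmers/Level1/report_result.py | solution
-- ===== SOURCE A (Python) =====
-- def solution(id_list, report, k):
--     reported_cnt = dict()
--     hist = {id_:set() for id_ in id_list}
--
--     for r in report:
--         from_usr, to_usr = r.split()
--         if to_usr not in hist[from_usr]:
--             hist[from_usr].add(to_usr)
--             reported_cnt[to_usr] = reported_cnt.get(to_usr, 0) + 1
--
--     answer = []
--     for id_ in id_list:
--         cnt = 0
--         for reported_usr in hist[id_]:
--             if reported_cnt[reported_usr] >= k:
--                 cnt += 1
--         answer.append(cnt)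
--     return answer
-- ===== SOURCE B (Python) =====
-- def solution(id_list, report, k):
--     # Reverse grouping: collect for each reported user the SET of distinct reporters
--     # (dedup falls out of set semantics), then distribute +1 back to every reporter
--     # of each user reported by at least k distinct people.
--     reported_by = {}
--     for r in report:
--         from_usr, to_usr = r.split()
--         reported_by.setdefault(to_usr, set()).add(from_usr)
--     answer = {id_: 0 for id_ in id_list}
--     for reporters in reported_by.values():
--         if len(reporters) >= k:
--             for from_usr in reporters:
--                 answer[from_usr] += 1
--     return [answer[id_] for id_ in id_list]
-- ===== Notes on version B (the rewrite author's own statement) =====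
-- stated objective: alternative
-- what changed: Replaces A's forward per-reporter dedup sets plus running count dict and per-id nested counting loop by a single REVERSE map reported_by[to] = set of distinct reporters (dedup comes free from set semantics, the count is the set's size) and a distribution pass that adds 1 to every reporter of each user with >= k distinct reporters.
import Mathlib
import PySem

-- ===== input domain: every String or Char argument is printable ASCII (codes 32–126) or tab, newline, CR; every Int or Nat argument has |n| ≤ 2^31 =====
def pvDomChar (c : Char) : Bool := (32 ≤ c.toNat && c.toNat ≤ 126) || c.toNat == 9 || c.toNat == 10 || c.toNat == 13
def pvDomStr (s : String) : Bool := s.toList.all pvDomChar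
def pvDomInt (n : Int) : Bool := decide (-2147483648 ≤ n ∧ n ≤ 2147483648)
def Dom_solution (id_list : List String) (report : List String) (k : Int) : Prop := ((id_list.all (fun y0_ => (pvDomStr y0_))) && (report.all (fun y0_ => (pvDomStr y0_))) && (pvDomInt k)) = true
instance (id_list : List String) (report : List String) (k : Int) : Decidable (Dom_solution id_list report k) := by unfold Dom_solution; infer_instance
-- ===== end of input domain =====

-- B replaces A's forward per-reporter sets + running count dict + per-id nested counting loop by a
-- reverse map reported_by[to] = set of distinct reporters with one distribution pass (objective: alternative).

-- ===== PORT A =====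
-- hist = {id_: set() for id_ in id_list}
def histInit (id_list : List String) : PySem.Dict String (PySem.Set String) :=
  id_list.foldl (fun d i => d.insert i PySem.Set.empty) PySem.Dict.empty

-- one iteration of A's first loop; state = (reported_cnt, hist).
-- 'none' branches are where Python raises (bad unpack / hist KeyError): excluded by Pre_.
def stepA (st : PySem.Dict String Int × PySem.Dict String (PySem.Set String)) (r : String) :
    PySem.Dict String Int × PySem.Dict String (PySem.Set String) :=
  match PySem.Str.split₀ r with
  | [f, t] =>
    match st.2.get? f with
    | some s =>
      if t ∉ s then
        (st.1.insert t (st.1.getD t 0 + 1), st.2.insert f (PySem.Set.add s t))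
      else st
    | none => st
  | _ => st

def solution (id_list : List String) (report : List String) (k : Int) : List Int :=
  let st := report.foldl stepA (PySem.Dict.empty, histInit id_list)
  -- reported_cnt[reported_usr] always has the key when reached; getD is exact there
  id_list.foldl (fun ans i =>
    ans ++ [(st.2.getD i PySem.Set.empty).foldl
              (fun c t => if st.1.getD t 0 ≥ k then c + 1 else c) (0 : Int)]) []

-- ===== PORT B =====
-- reported_by.setdefault(to_usr, set()).add(from_usr): value at to_usr becomes (old or empty set)
-- with from_usr added, position kept / appended at end — exactly Dict.modify
def stepB (d : PySem.Dict String (PySem.Set String)) (r : String) :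
    PySem.Dict String (PySem.Set String) :=
  match PySem.Str.split₀ r with
  | [f, t] => d.modify t PySem.Set.empty (fun s => PySem.Set.add s f)
  | _ => d

def solution_alt (id_list : List String) (report : List String) (k : Int) : List Int :=
  let rb := report.foldl stepB PySem.Dict.empty
  let answer0 := id_list.foldl (fun d i => d.insert i (0 : Int)) PySem.Dict.empty
  -- 'for from_usr in reporters' iterates a set, but it only increments counters in a dict
  -- that is looked up afterwards, so the hash order cannot affect the result
  let answer := rb.values.foldl (fun d s =>
      if (s.length : Int) ≥ k then s.foldl (fun d f => d.modify f 0 (fun x => x + 1)) d else d) answer0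
  id_list.map (fun i => answer.getD i 0)

-- ===== PRECONDITION & SPEC =====
-- Pre_: every report line splits into exactly two words and the reporter is in id_list;
-- otherwise Python A raises (ValueError on unpacking, or KeyError on hist[from_usr]).
def Pre_solution (id_list : List String) (report : List String) (k : Int) : Prop :=
  ∀ r ∈ report, (PySem.Str.split₀ r).length = 2 ∧ (PySem.Str.split₀ r).headI ∈ id_list

instance (id_list : List String) (report : List String) (k : Int) : Decidable (Pre_solution id_list report k) := by
  unfold Pre_solution; infer_instance

def pvWitness_solution : List String × List String × Int :=
  (["muzi", "frodo", "apeach"], ["muzi frodo", "apeach frodo", "muzi frodo"], 2)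

def Spec_solution (id_list : List String) (report : List String) (k : Int) (out : List Int) : Prop := out = solution_alt id_list report k
instance (id_list : List String) (report : List String) (k : Int) (out : List Int) : Decidable (Spec_solution id_list report k out) := by unfold Spec_solution; infer_instance

-- ===== CLAIM (what is proved, stated in full; the proofs are below) =====
def Claim_equal_solution : Prop := ∀ (id_list : List String) (report : List String) (k : Int), Dom_solution id_list report k → Pre_solution id_list report k → Spec_solution id_list report k (solution id_list report k)

-- ===== LEMMAS AND PROOFS =====

-- the pair (from, to) a 2-word report line denotes (proof-side view of both first loops)
def pairOf (r : String) : String × String :=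
  match PySem.Str.split₀ r with
  | [f, t] => (f, t)
  | _ => ("", "")

lemma split_eq_pairOf (r : String) (h : (PySem.Str.split₀ r).length = 2) :
    PySem.Str.split₀ r = [(pairOf r).1, (pairOf r).2] := by
  unfold pairOf
  cases hs : PySem.Str.split₀ r with
  | nil => rw [hs] at h; simp at h
  | cons a l =>
    cases l with
    | nil => rw [hs] at h; simp at h
    | cons b l2 =>
      cases l2 with
      | nil => rfl
      | cons c l3 => rw [hs] at h; simp at h

-- reference recursion: the final deduplicated pair list
def extPairs (pairs : List (String × String)) (report : List String) : List (String × String) :=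
  match report with
  | [] => pairs
  | r :: rest =>
    match PySem.Str.split₀ r with
    | [f, t] => extPairs (if (f, t) ∈ pairs then pairs else pairs ++ [(f, t)]) rest
    | _ => extPairs pairs rest

-- the cnt dict built from a pair list (A's interleaved cnt updates, in final form)
def cntOf (pairs : List (String × String)) : PySem.Dict String Int :=
  pairs.foldl (fun d p => d.insert p.2 (d.getD p.2 0 + 1)) PySem.Dict.empty

-- the set hist[x] holds after processing pairs
def setFor (x : String) (pairs : List (String × String)) : PySem.Set String :=
  (pairs.filter (fun p => p.1 == x)).map (·.2)

lemma mem_setFor (x t : String) (pairs : List (String × String)) :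
    t ∈ setFor x pairs ↔ (x, t) ∈ pairs := by
  simp only [setFor, List.mem_map, List.mem_filter, beq_iff_eq]
  constructor
  · rintro ⟨⟨a, b⟩, ⟨hm, h1⟩, h2⟩; simp_all
  · intro h; exact ⟨(x, t), ⟨h, rfl⟩, rfl⟩

lemma set_add_of_not_mem {α : Type} [BEq α] [LawfulBEq α] (s : PySem.Set α) (x : α) (h : x ∉ s) :
    PySem.Set.add s x = s ++ [x] := by
  simp [PySem.Set.add, PySem.Set.contains]
  intro hc
  exact absurd hc h

lemma set_add_of_mem {α : Type} [BEq α] [LawfulBEq α] (s : PySem.Set α) (x : α) (h : x ∈ s) :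
    PySem.Set.add s x = s := by
  simp [PySem.Set.add, PySem.Set.contains, h]

lemma setFor_concat_self (x t : String) (pairs : List (String × String)) :
    setFor x (pairs ++ [(x, t)]) = setFor x pairs ++ [t] := by
  simp [setFor, List.filter_append]

lemma setFor_concat_other (x f t : String) (pairs : List (String × String)) (h : x ≠ f) :
    setFor x (pairs ++ [(f, t)]) = setFor x pairs := by
  have hb : ((f, t).1 == x) = false := by simp; exact Ne.symm h
  simp [setFor, List.filter_append, hb]

lemma cntOf_concat (pairs : List (String × String)) (p : String × String) :
    cntOf (pairs ++ [p]) = (cntOf pairs).insert p.2 ((cntOf pairs).getD p.2 0 + 1) := by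
  simp [cntOf, List.foldl_append]

-- A's first loop, characterised by extPairs (needs Pre_ on the remaining report)
lemma lemA (id_list : List String) (report : List String)
    (hpre : ∀ r ∈ report, (PySem.Str.split₀ r).length = 2 ∧ (PySem.Str.split₀ r).headI ∈ id_list) :
    ∀ (pairs : List (String × String)) (hist : PySem.Dict String (PySem.Set String)),
      (∀ x, hist.get? x = if x ∈ id_list then some (setFor x pairs) else none) →
      (report.foldl stepA (cntOf pairs, hist)).1 = cntOf (extPairs pairs report) ∧
      (∀ x, (report.foldl stepA (cntOf pairs, hist)).2.get? x =
          if x ∈ id_list then some (setFor x (extPairs pairs report)) else none) := by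
  induction report with
  | nil => intro pairs hist hinv; exact ⟨rfl, by simpa [extPairs] using hinv⟩
  | cons r rest ih =>
    intro pairs hist hinv
    obtain ⟨hlen, hhead⟩ := hpre r (by simp)
    have hprer : ∀ r' ∈ rest, (PySem.Str.split₀ r').length = 2 ∧ (PySem.Str.split₀ r').headI ∈ id_list :=
      fun r' hr' => hpre r' (by simp [hr'])
    obtain ⟨f, t, hs⟩ : ∃ f t, PySem.Str.split₀ r = [f, t] :=
      ⟨(pairOf r).1, (pairOf r).2, split_eq_pairOf r hlen⟩
    have hf : f ∈ id_list := by rw [hs] at hhead; simpa using hhead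
    rw [List.foldl_cons]
    have hstep : stepA (cntOf pairs, hist) r =
        if (f, t) ∈ pairs then (cntOf pairs, hist)
        else (cntOf (pairs ++ [(f, t)]), hist.insert f (PySem.Set.add (setFor f pairs) t)) := by
      unfold stepA
      rw [hs]
      simp only [hinv f, hf, if_true]
      by_cases hmem : (f, t) ∈ pairs
      · simp [mem_setFor, hmem]
      · simp [mem_setFor, hmem, cntOf_concat]
    have hext : extPairs pairs (r :: rest) =
        extPairs (if (f, t) ∈ pairs then pairs else pairs ++ [(f, t)]) rest := by
      conv_lhs => unfold extPairs
      rw [hs]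
    rw [hstep, hext]
    by_cases hmem : (f, t) ∈ pairs
    · simp only [hmem, if_true]
      exact ih hprer pairs hist hinv
    · simp only [hmem, if_false]
      apply ih hprer (pairs ++ [(f, t)])
      intro x
      by_cases hxf : x = f
      · subst hxf
        rw [PySem.Dict.get?_insert_self, if_pos hf, setFor_concat_self,
            set_add_of_not_mem _ _ (by rw [mem_setFor]; exact hmem)]
      · rw [PySem.Dict.get?_insert_of_ne _ _ hxf, hinv x, setFor_concat_other _ _ _ _ hxf]

-- {i: v for i in l} lookups
lemma foldl_insert_const_get? {ν : Type} (l : List String) (d : PySem.Dict String ν) (v : ν) (x : String) :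
    (l.foldl (fun d i => d.insert i v) d).get? x = if x ∈ l then some v else d.get? x := by
  induction l generalizing d with
  | nil => simp
  | cons j rest ih =>
    rw [List.foldl_cons, ih]
    by_cases hx : x ∈ rest
    · simp [hx]
    · by_cases hxj : x = j
      · subst hxj; simp [hx, PySem.Dict.get?_insert_self]
      · simp [hx, hxj, PySem.Dict.get?_insert_of_ne _ _ hxj]

lemma getD_eq_get?_getD {ν : Type} (d : PySem.Dict String ν) (x : String) (d0 : ν) :
    d.getD x d0 = (d.get? x).getD d0 := by
  simp [PySem.Dict.getD, PySem.Dict.get?]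

lemma update_nil_eq_ofList {α : Type} [BEq α] (xs : List α) :
    PySem.Set.update [] xs = PySem.Set.ofList xs := by
  simp [PySem.Set.update, PySem.Set.ofList_eq_foldl]

-- extPairs is set(...) over the pair list of the report
lemma extPairs_eq_update (report : List String) :
    ∀ pairs : List (String × String), (∀ r ∈ report, (PySem.Str.split₀ r).length = 2) →
      extPairs pairs report = PySem.Set.update pairs (report.map pairOf) := by
  induction report with
  | nil => intro pairs _; simp [extPairs, PySem.Set.update]
  | cons r rest ih =>
    intro pairs h
    have hs := split_eq_pairOf r ((h r) (by simp))
    have hrest : ∀ r' ∈ rest, (PySem.Str.split₀ r').length = 2 := fun r' hr' => h r' (by simp [hr'])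
    have hl : extPairs pairs (r :: rest) =
        extPairs (if pairOf r ∈ pairs then pairs else pairs ++ [pairOf r]) rest := by
      conv_lhs => unfold extPairs
      rw [hs]
    rw [hl, ih _ hrest]
    have hr : PySem.Set.update pairs ((r :: rest).map pairOf) =
        PySem.Set.update (PySem.Set.add pairs (pairOf r)) (rest.map pairOf) := by
      simp [PySem.Set.update]
    rw [hr]
    by_cases hmem : pairOf r ∈ pairs
    · rw [if_pos hmem, set_add_of_mem _ _ hmem]
    · rw [if_neg hmem, set_add_of_not_mem _ _ hmem]

-- cnt lookups are counts over the second components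
lemma cntOf_getD (Q : List (String × String)) (t : String) :
    (cntOf Q).getD t 0 = ((Q.map (·.2)).count t : Int) := by
  have h : cntOf Q = (Q.map (·.2)).foldl (fun d x => d.insert x (d.getD x 0 + 1)) PySem.Dict.empty := by
    rw [List.foldl_map]; rfl
  rw [h, PySem.Dict.getD_foldl_insert_add_one, PySem.Dict.getD_empty, zero_add]

-- B's grouping loop: the set stored at t is the distinct reporters of t, in first-report order
lemma rbGetD (l : List (String × String)) :
    ∀ (d : PySem.Dict String (PySem.Set String)) (t : String),
      (l.foldl (fun d p => d.modify p.2 PySem.Set.empty (fun s => PySem.Set.add s p.1)) d).getD t PySem.Set.empty =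
        PySem.Set.update (d.getD t PySem.Set.empty) ((l.filter (fun p => p.2 == t)).map (·.1)) := by
  induction l with
  | nil => intro d t; simp [PySem.Set.update]
  | cons p rest ih =>
    intro d t
    rw [List.foldl_cons, ih]
    by_cases hpt : t = p.2
    · have hb : (p.2 == t) = true := by simp [hpt]
      rw [PySem.Dict.getD_modify]
      simp only [hpt, if_pos rfl, List.filter_cons, hb, if_true]
      have : PySem.Set.update (d.getD p.2 PySem.Set.empty) (p.1 :: (rest.filter (fun q => q.2 == p.2)).map (·.1)) =
          PySem.Set.update (PySem.Set.add (d.getD p.2 PySem.Set.empty) p.1) ((rest.filter (fun q => q.2 == p.2)).map (·.1)) := by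
        simp [PySem.Set.update]
      simp_all
    · have hb : (p.2 == t) = false := by simp; exact fun h => hpt h.symm
      rw [PySem.Dict.getD_modify, if_neg hpt]
      simp [List.filter_cons, hb]

-- Set.update commutes with filter
lemma update_filter {α : Type} [BEq α] [LawfulBEq α] (L : List α) :
    ∀ (s : PySem.Set α) (p : α → Bool),
      (PySem.Set.update s L).filter p = PySem.Set.update (s.filter p) (L.filter p) := by
  induction L with
  | nil => intro s p; simp [PySem.Set.update]
  | cons x L' ih =>
    intro s p
    have h1 : PySem.Set.update s (x :: L') = PySem.Set.update (PySem.Set.add s x) L' := by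
      simp [PySem.Set.update]
    rw [h1, ih]
    cases hp : p x with
    | true =>
      have h2 : (x :: L').filter p = x :: L'.filter p := by simp [List.filter_cons, hp]
      rw [h2]
      have h3 : PySem.Set.update (s.filter p) (x :: L'.filter p) =
          PySem.Set.update (PySem.Set.add (s.filter p) x) (L'.filter p) := by
        simp [PySem.Set.update]
      rw [h3]
      congr 1
      by_cases hm : x ∈ s
      · rw [set_add_of_mem _ _ hm, set_add_of_mem _ _ (List.mem_filter.mpr ⟨hm, hp⟩)]
      · rw [set_add_of_not_mem _ _ hm,
            set_add_of_not_mem _ _ (fun hc => hm (List.mem_filter.mp hc).1),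
            List.filter_append]
        simp [hp]
    | false =>
      have h2 : (x :: L').filter p = L'.filter p := by simp [List.filter_cons, hp]
      rw [h2]
      congr 1
      by_cases hm : x ∈ s
      · rw [set_add_of_mem _ _ hm]
      · rw [set_add_of_not_mem _ _ hm, List.filter_append]
        simp [hp]

lemma ofList_filter {α : Type} [BEq α] [LawfulBEq α] (L : List α) (p : α → Bool) :
    PySem.Set.ofList (L.filter p) = (PySem.Set.ofList L).filter p := by
  rw [← update_nil_eq_ofList, ← update_nil_eq_ofList, update_filter]
  rfl

-- Set.ofList commutes with an injective-on-the-list map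
lemma update_map_on {α β : Type} [BEq α] [LawfulBEq α] [BEq β] [LawfulBEq β] (f : α → β) (M : List α) :
    ∀ s : PySem.Set α, (∀ a, (a ∈ s ∨ a ∈ M) → ∀ b, (b ∈ s ∨ b ∈ M) → f a = f b → a = b) →
      PySem.Set.update (s.map f) (M.map f) = (PySem.Set.update s M).map f := by
  induction M with
  | nil => intro s _; simp [PySem.Set.update]
  | cons x M' ih =>
    intro s hinj
    have h1 : PySem.Set.update (s.map f) ((x :: M').map f) =
        PySem.Set.update (PySem.Set.add (s.map f) (f x)) (M'.map f) := by
      simp [PySem.Set.update]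
    have h2 : PySem.Set.update s (x :: M') = PySem.Set.update (PySem.Set.add s x) M' := by
      simp [PySem.Set.update]
    rw [h1, h2]
    have hadd : PySem.Set.add (s.map f) (f x) = (PySem.Set.add s x).map f := by
      by_cases hm : x ∈ s
      · rw [set_add_of_mem _ _ hm, set_add_of_mem _ _ (List.mem_map.mpr ⟨x, hm, rfl⟩)]
      · have hfm : f x ∉ s.map f := by
          intro hc
          obtain ⟨a, ha, hfa⟩ := List.mem_map.mp hc
          exact hm (hinj a (Or.inl ha) x (Or.inr (by simp)) hfa ▸ ha)
        rw [set_add_of_not_mem _ _ hm, set_add_of_not_mem _ _ hfm, List.map_append]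
        rfl
    rw [hadd]
    apply ih
    intro a ha b hb hfab
    have hmem : ∀ c, c ∈ PySem.Set.add s x ∨ c ∈ M' → c ∈ s ∨ c ∈ x :: M' := by
      intro c hc
      rcases hc with hc | hc
      · by_cases hm : x ∈ s
        · rw [set_add_of_mem _ _ hm] at hc; exact Or.inl hc
        · rw [set_add_of_not_mem _ _ hm] at hc
          rcases List.mem_append.mp hc with hc | hc
          · exact Or.inl hc
          · simp at hc; exact Or.inr (by simp [hc])
      · exact Or.inr (by simp [hc])
    exact hinj a (hmem a ha) b (hmem b hb) hfab

-- a 0/1-sum over Nat is a countP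
lemma sum_map_ite_one_nat {α : Type} (p : α → Prop) [DecidablePred p] (l : List α) :
    (l.map (fun t => if p t then (1 : Nat) else 0)).sum = l.countP (fun t => decide (p t)) := by
  induction l with
  | nil => simp
  | cons x xs ih =>
    simp only [List.map_cons, List.sum_cons, List.countP_cons, ih]
    by_cases hx : p x <;> simp [hx] <;> omega


-- B's grouping step on the pair level
def gB (d : PySem.Dict String (PySem.Set String)) (p : String × String) :
    PySem.Dict String (PySem.Set String) :=
  d.modify p.2 PySem.Set.empty (fun s => PySem.Set.add s p.1)

lemma rbKeys (L : List (String × String)) :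
    (L.foldl gB PySem.Dict.empty).keys = PySem.Set.ofList (L.map (·.2)) := by
  have h := PySem.Dict.keys_foldl_modify_key L (fun p => p.2) PySem.Set.empty
    (fun _ p s => PySem.Set.add s p.1) PySem.Dict.empty
  simpa [gB, PySem.Dict.keys_empty, update_nil_eq_ofList] using h

lemma rbKeysNodup (L : List (String × String)) :
    (L.foldl gB PySem.Dict.empty).keys.Nodup := by
  have h := PySem.Dict.nodup_keys_foldl_modify_key L (fun p => p.2) PySem.Set.empty
    (fun _ p s => PySem.Set.add s p.1) PySem.Dict.empty PySem.Dict.nodup_keys_empty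
  simpa [gB] using h

lemma rbGetD0 (L : List (String × String)) (t : String) :
    (L.foldl gB PySem.Dict.empty).getD t PySem.Set.empty =
      PySem.Set.ofList ((L.filter (fun p => p.2 == t)).map (·.1)) := by
  have h := rbGetD L PySem.Dict.empty t
  simpa [gB, PySem.Dict.getD_empty, update_nil_eq_ofList] using h

lemma mem_rbGetD0 (L : List (String × String)) (i t : String) :
    i ∈ (L.foldl gB PySem.Dict.empty).getD t PySem.Set.empty ↔ (i, t) ∈ L := by
  rw [rbGetD0, PySem.Set.mem_ofList]
  simp only [List.mem_map, List.mem_filter, beq_iff_eq]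
  constructor
  · rintro ⟨⟨a, b⟩, ⟨hm, h1⟩, h2⟩; simp_all
  · intro h; exact ⟨(i, t), ⟨h, rfl⟩, rfl⟩

-- the number of distinct reporters of t equals the count of t among the deduped pairs' targets
lemma rbGetD0_length (L : List (String × String)) (t : String) :
    ((L.foldl gB PySem.Dict.empty).getD t PySem.Set.empty).length =
      List.countP (fun p => p.2 == t) (PySem.Set.ofList L) := by
  rw [rbGetD0]
  have hinj : ∀ a, (a ∈ ([] : List (String × String)) ∨ a ∈ L.filter (fun p => p.2 == t)) →
      ∀ b, (b ∈ ([] : List (String × String)) ∨ b ∈ L.filter (fun p => p.2 == t)) →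
      ((fun p : String × String => p.1) a = (fun p : String × String => p.1) b) → a = b := by
    rintro ⟨a1, a2⟩ (h | ha) ⟨b1, b2⟩ (h' | hb) hab
    · simp at h
    · simp at h
    · simp at h'
    · have ha2 : a2 = t := by simpa using (List.mem_filter.mp ha).2
      have hb2 : b2 = t := by simpa using (List.mem_filter.mp hb).2
      simp_all
  have hmap := update_map_on (fun p : String × String => p.1) (L.filter (fun p => p.2 == t)) [] hinj
  simp only [List.map_nil] at hmap
  rw [show PySem.Set.ofList ((L.filter (fun p => p.2 == t)).map (·.1)) =
        PySem.Set.update ([] : List String) ((L.filter (fun p => p.2 == t)).map (fun p => p.1)) from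
      (update_nil_eq_ofList _).symm,
      hmap, update_nil_eq_ofList, ofList_filter]
  rw [List.length_map, ← List.countP_eq_length_filter]

-- B's distribution loop, read off at one id
lemma bAnswerGetD (K : List String) (R : String → PySem.Set String) (k : Int)
    (a : PySem.Dict String Int) (i : String) :
    (K.foldl (fun d t => if ((R t).length : Int) ≥ k then
        (R t).foldl (fun d f => d.modify f 0 (fun x => x + 1)) d else d) a).getD i 0
      = a.getD i 0 +
        (((K.filter (fun t => decide (((R t).length : Int) ≥ k))).flatMap R).count i : Int) := by
  induction K generalizing a with
  | nil => simp
  | cons t K' ih =>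
    rw [List.foldl_cons]
    by_cases hc : ((R t).length : Int) ≥ k
    · rw [if_pos hc, ih, List.filter_cons_of_pos (by simpa using hc), List.flatMap_cons,
          List.count_append, PySem.Dict.getD_foldl_modify_add_one]
      push_cast
      ring
    · rw [if_neg hc, ih, List.filter_cons_of_neg (by simpa using hc)]

-- ===== VERDICT (by name: the statement is the Claim_ definition above) =====
theorem solution_spec : Claim_equal_solution := by
  intro id_list report k _hdom hpre
  show solution id_list report k = solution_alt id_list report k
  have hlen2 : ∀ r ∈ report, (PySem.Str.split₀ r).length = 2 := fun r hr => (hpre r hr).1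
  have hrb : report.foldl stepB PySem.Dict.empty = (report.map pairOf).foldl gB PySem.Dict.empty := by
    rw [List.foldl_map]
    apply PySem.List.foldl_congr_mem
    intro d r hr
    unfold stepB gB
    rw [split_eq_pairOf r (hlen2 r hr)]
  -- ===== A side =====
  unfold solution
  have hA := lemA id_list report hpre [] (histInit id_list) (by
    intro x
    rw [histInit, foldl_insert_const_get?]
    by_cases hx : x ∈ id_list <;> simp [hx, setFor, PySem.Set.empty, PySem.Dict.get?, PySem.Dict.empty])
  obtain ⟨hcnt, hhist⟩ := hA
  rw [show (PySem.Dict.empty : PySem.Dict String Int) = cntOf [] from rfl]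
  rw [PySem.List.foldl_append_singleton_eq_map
    (f := fun i => ((report.foldl stepA (cntOf [], histInit id_list)).2.getD i PySem.Set.empty).foldl
      (fun c t => if (report.foldl stepA (cntOf [], histInit id_list)).1.getD t 0 >= k then c + 1 else c) (0 : Int))]
  rw [List.nil_append]
  -- ===== B side =====
  have hBexp : solution_alt id_list report k =
      id_list.map (fun i => ((report.foldl stepB PySem.Dict.empty).values.foldl
        (fun d s => if (s.length : Int) ≥ k then
            s.foldl (fun d f => d.modify f 0 (fun x => x + 1)) d else d)
        (id_list.foldl (fun d i => d.insert i (0 : Int)) PySem.Dict.empty)).getD i 0) := rfl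
  rw [hBexp, hrb,
      PySem.Dict.values_eq_map_keys ((report.map pairOf).foldl gB PySem.Dict.empty)
        (rbKeysNodup (report.map pairOf)) PySem.Set.empty,
      List.foldl_map]
  apply List.map_congr_left
  intro i hi
  beta_reduce
  rw [bAnswerGetD ((report.map pairOf).foldl gB PySem.Dict.empty).keys
        (fun t => ((report.map pairOf).foldl gB PySem.Dict.empty).getD t PySem.Set.empty) k
        (id_list.foldl (fun d i => d.insert i (0 : Int)) PySem.Dict.empty) i]
  have h0 : (id_list.foldl (fun d i => d.insert i (0 : Int)) PySem.Dict.empty).getD i 0 = 0 := by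
    rw [getD_eq_get?_getD, foldl_insert_const_get?, if_pos hi]; rfl
  rw [h0, zero_add]
  -- A's value at i, as a countP over the deduped pairs
  rw [getD_eq_get?_getD, hhist i, if_pos hi]
  show (setFor i (extPairs [] report)).foldl _ _ = _
  rw [show (report.foldl stepA (cntOf [], histInit id_list)).1 = cntOf (extPairs [] report) from hcnt]
  rw [extPairs_eq_update report [] hlen2, update_nil_eq_ofList]
  rw [PySem.List.foldl_ite_add_one
        (fun t => (cntOf (PySem.Set.ofList (report.map pairOf))).getD t 0 >= k), zero_add]
  -- both sides are Nat counts now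
  congr 1
  rw [List.count_flatMap]
  -- abbreviations (not `set`: plain lets in the proof script)
  have hcR : ∀ t, (((report.map pairOf).foldl gB PySem.Dict.empty).getD t PySem.Set.empty).count i =
      if (i, t) ∈ report.map pairOf then 1 else 0 := by
    intro t
    by_cases hit : (i, t) ∈ report.map pairOf
    · rw [if_pos hit]
      exact List.count_eq_one_of_mem (rbGetD0 (report.map pairOf) t ▸
        PySem.Set.nodup_ofList _) ((mem_rbGetD0 _ i t).mpr hit)
    · rw [if_neg hit]
      exact List.count_eq_zero.mpr (fun hc => hit ((mem_rbGetD0 _ i t).mp hc))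
  simp only [Function.comp_def]
  rw [List.map_congr_left (fun t _ => hcR t), sum_map_ite_one_nat (fun t => (i, t) ∈ report.map pairOf),
      List.countP_filter]
  -- the two threshold tests agree
  have hcond : ∀ t, (decide ((((((report.map pairOf).foldl gB PySem.Dict.empty).getD t PySem.Set.empty).length : Nat) : Int) >= k))
      = (decide ((cntOf (PySem.Set.ofList (report.map pairOf))).getD t 0 >= k)) := by
    intro t
    have hc : (cntOf (PySem.Set.ofList (report.map pairOf))).getD t 0 =
        (((((report.map pairOf).foldl gB PySem.Dict.empty).getD t PySem.Set.empty).length : Nat) : Int) := by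
      rw [cntOf_getD, rbGetD0_length]
      congr 1
      rw [List.count_eq_countP, List.countP_map]
      apply List.countP_congr
      intro p _
      simp
    rw [hc]
  -- permutation of the two nodup lists of qualifying reported users
  have hA_nd : ((setFor i (PySem.Set.ofList (report.map pairOf))).filter
      (fun t => decide ((cntOf (PySem.Set.ofList (report.map pairOf))).getD t 0 >= k))).Nodup := by
    apply List.Nodup.filter
    apply List.Nodup.map_on
    · rintro ⟨a1, a2⟩ ha ⟨b1, b2⟩ hb hab
      have ha1 : a1 = i := by simpa using (List.mem_filter.mp ha).2
      have hb1 : b1 = i := by simpa using (List.mem_filter.mp hb).2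
      simp_all
    · exact (PySem.Set.nodup_ofList _).filter _
  have hB_nd : (((report.map pairOf).foldl gB PySem.Dict.empty).keys.filter
      (fun t => decide ((i, t) ∈ report.map pairOf) &&
        decide (((((report.map pairOf).foldl gB PySem.Dict.empty).getD t PySem.Set.empty).length : Int) >= k))).Nodup :=
    (rbKeysNodup _).filter _
  rw [List.countP_eq_length_filter, List.countP_eq_length_filter]
  apply List.Perm.length_eq
  apply (List.perm_ext_iff_of_nodup hA_nd hB_nd).mpr
  intro t
  simp only [List.mem_filter, mem_setFor, rbKeys, PySem.Set.mem_ofList, Bool.and_eq_true,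
    decide_eq_true_eq]
  constructor
  · rintro ⟨hmem, hcnd⟩
    have hitL : (i, t) ∈ report.map pairOf := hmem
    refine ⟨List.mem_map.mpr ⟨(i, t), hitL, rfl⟩, hitL, ?_⟩
    have := (hcond t)
    simp only [decide_eq_decide] at this
    exact this.mpr hcnd
  · rintro ⟨_, hitL, hcnd⟩
    refine ⟨hitL, ?_⟩
    have := (hcond t)
    simp only [decide_eq_decide] at this
    exact this.mp hcnd
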